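-- pv_equiv track=rewrite | github.com/lambor/shell-like | shell.py | __search_preceding_word
-- ===== SOURCE A (Python) =====
-- def __search_preceding_word(line, offset):
--     found = False
--     for i in range(min(len(line)-1, offset-1), -1, -1):
--         if line[i] != ' ':
--             found = True
--         elif found:
--             return i+1, offset
--     return 0, offset
-- ===== SOURCE B (Python) =====
-- def __search_preceding_word(line, offset):
--     end = min(len(line), offset)
--     if end <= 0:
--         return 0, offset
--     s = line[:end].rstrip(' ')
--     return s.rfind(' ') + 1, offset
-- ===== Notes on version B (the rewrite author's own statement) =====
-- stated objective: simpler
-- what changed: Replaces the manual backward index scan with a 'found' flag by slicing the line to the effective end, stripping trailing spaces, and using rfind(' ')+1 to locate the start of the preceding word.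
import Mathlib
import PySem

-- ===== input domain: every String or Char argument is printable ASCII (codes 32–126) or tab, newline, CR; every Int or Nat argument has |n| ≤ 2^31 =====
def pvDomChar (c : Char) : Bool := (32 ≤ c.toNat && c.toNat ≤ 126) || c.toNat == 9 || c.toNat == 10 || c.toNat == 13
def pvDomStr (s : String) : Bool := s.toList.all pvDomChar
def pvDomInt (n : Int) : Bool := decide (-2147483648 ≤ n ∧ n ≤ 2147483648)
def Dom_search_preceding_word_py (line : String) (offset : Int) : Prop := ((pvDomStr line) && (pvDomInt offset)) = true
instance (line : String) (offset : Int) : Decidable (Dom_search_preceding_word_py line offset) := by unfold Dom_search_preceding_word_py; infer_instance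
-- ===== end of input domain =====

-- B replaces A's backward index scan with a found flag by slice + rstrip(' ') + rfind(' ')+1 (simpler decomposition).

-- ===== PORT A =====
-- the for-loop with its early return, as structural recursion over the countdown index list
def pvALoop (line : List Char) : List Int → Bool → Option Int
  | [], _ => none
  | i :: rest, found =>
    if PySem.List.pyGetD line i ' ' ≠ ' ' then pvALoop line rest true
    else if found then some (i + 1)
    else pvALoop line rest found

def search_preceding_word_py (line : String) (offset : Int) : Int × Int :=
  match pvALoop line.toList
      (PySem.List.pyRange (min ((line.toList.length : Int) - 1) (offset - 1)) (-1) (-1)) false with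
  | some r => (r, offset)
  | none => (0, offset)

-- ===== PORT B =====
-- hand port of str.rstrip(' '): drop the trailing spaces (exact for a single strip character)
def pvRstripSpace (l : List Char) : List Char := (l.reverse.dropWhile (fun c => c == ' ')).reverse
-- hand port of str.rfind(' '): index of the last space, -1 if none (exact for a one-char needle)
def pvRfindSpace (l : List Char) : Int := ((l.reverse.dropWhile (fun c => c != ' ')).length : Int) - 1

def search_preceding_word_py_alt (line : String) (offset : Int) : Int × Int :=
  let e := min ((line.toList.length : Int)) offset
  if e ≤ 0 then (0, offset)
  else
    let s := pvRstripSpace (line.toList.take e.toNat)   -- line[:end] with 0 < end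
    (pvRfindSpace s + 1, offset)

-- ===== PRECONDITION & SPEC =====
def Spec_search_preceding_word_py (line : String) (offset : Int) (out : Int × Int) : Prop := out = search_preceding_word_py_alt line offset
instance (line : String) (offset : Int) (out : Int × Int) : Decidable (Spec_search_preceding_word_py line offset out) := by unfold Spec_search_preceding_word_py; infer_instance

-- ===== CLAIM (what is proved, stated in full; the proofs are below) =====
def Claim_equal_search_preceding_word_py : Prop := ∀ (line : String) (offset : Int), Dom_search_preceding_word_py line offset → Spec_search_preceding_word_py line offset (search_preceding_word_py line offset)

-- ===== LEMMAS AND PROOFS =====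

-- A's loop over indices [k-1, …, 0], re-read as a scan over the reversed k-prefix
def pvFRev : List Char → Bool → Option Int
  | [], _ => none
  | c :: r, found =>
    if c ≠ ' ' then pvFRev r true
    else if found then some ((r.length : Int) + 1)
    else pvFRev r found

theorem pvALoop_eq_fRev (l : List Char) (k : Nat) (hk : k ≤ l.length) (found : Bool) :
    pvALoop l (PySem.List.pyRange ((k : Int) - 1) (-1) (-1)) found = pvFRev ((l.take k).reverse) found := by
  induction k generalizing found with
  | zero =>
    rw [PySem.List.pyRange_neg_one_eq_nil (by norm_num)]
    simp [pvALoop, pvFRev]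
  | succ k ih =>
    have hk' : k < l.length := by omega
    rw [show ((k + 1 : Nat) : Int) - 1 = (k : Int) by push_cast; ring,
        PySem.List.pyRange_neg_one_cons (by omega)]
    have hget : PySem.List.pyGetD l (k : Int) ' ' = l[k] := by
      simp [PySem.List.pyGetD, PySem.List.pyGet?, PySem.List.pyIdx?, hk']
    have htake : (l.take (k + 1)).reverse = l[k] :: (l.take k).reverse := by
      rw [List.take_add_one]
      simp [List.getElem?_eq_getElem hk']
    have hlen : (((l.take k).reverse).length : Int) = (k : Int) := by
      simp [Nat.min_eq_left (le_of_lt hk')]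
    rw [htake]
    by_cases hc : l[k] = ' '
    · cases found with
      | false =>
        rw [show pvALoop l ((k:Int) :: PySem.List.pyRange ((k:Int)-1) (-1) (-1)) false
              = pvALoop l (PySem.List.pyRange ((k:Int)-1) (-1) (-1)) false from by
            simp [pvALoop, hget, hc]]
        rw [show pvFRev (l[k] :: (l.take k).reverse) false = pvFRev ((l.take k).reverse) false from by
            simp [pvFRev, hc]]
        exact ih (by omega) false
      | true =>
        rw [show pvALoop l ((k:Int) :: PySem.List.pyRange ((k:Int)-1) (-1) (-1)) true
              = some ((k:Int) + 1) from by simp [pvALoop, hget, hc]]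
        rw [show pvFRev (l[k] :: (l.take k).reverse) true
              = some ((((l.take k).reverse).length : Int) + 1) from by simp [pvFRev, hc]]
        rw [hlen]
    · rw [show pvALoop l ((k:Int) :: PySem.List.pyRange ((k:Int)-1) (-1) (-1)) found
            = pvALoop l (PySem.List.pyRange ((k:Int)-1) (-1) (-1)) true from by
          simp [pvALoop, hget, hc]]
      rw [show pvFRev (l[k] :: (l.take k).reverse) found = pvFRev ((l.take k).reverse) true from by
          simp [pvFRev, hc]]
      exact ih (by omega) true

theorem pvFRev_true (u : List Char) :
    pvFRev u true = (if (u.dropWhile (fun c => c != ' ')).length = 0 then none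
                     else some (((u.dropWhile (fun c => c != ' ')).length : Int))) := by
  induction u with
  | nil => rfl
  | cons c r ih =>
    by_cases hc : c = ' '
    · subst hc
      rw [show pvFRev (' ' :: r) true = some ((r.length : Int) + 1) from by simp [pvFRev]]
      rw [List.dropWhile_cons_of_neg (by simp)]
      simp
    · rw [show pvFRev (c :: r) true = pvFRev r true from by simp [pvFRev, hc]]
      rw [List.dropWhile_cons_of_pos (by simp [hc])]
      exact ih

-- the value both programs compute on the reversed effective prefix
def pvVal (u : List Char) : Nat := ((u.dropWhile (fun c => c == ' ')).dropWhile (fun c => c != ' ')).length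

theorem pvFRev_false (u : List Char) :
    pvFRev u false = (if pvVal u = 0 then none else some ((pvVal u : Int))) := by
  induction u with
  | nil => rfl
  | cons c r ih =>
    by_cases hc : c = ' '
    · subst hc
      rw [show pvFRev (' ' :: r) false = pvFRev r false from by simp [pvFRev]]
      rw [show pvVal (' ' :: r) = pvVal r from by
          simp only [pvVal]; rw [List.dropWhile_cons_of_pos (by simp)]]
      exact ih
    · rw [show pvFRev (c :: r) false = pvFRev r true from by simp [pvFRev, hc]]
      rw [show pvVal (c :: r) = (r.dropWhile (fun c => c != ' ')).length from by
          simp only [pvVal]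
          rw [List.dropWhile_cons_of_neg (by simp [hc]),
              List.dropWhile_cons_of_pos (by simp [hc])]]
      exact pvFRev_true r

theorem pvB_val (l : List Char) :
    pvRfindSpace (pvRstripSpace l) + 1 = ((pvVal l.reverse : Nat) : Int) := by
  simp [pvRfindSpace, pvRstripSpace, pvVal]

-- ===== VERDICT (by name: the statement is the Claim_ definition above) =====
theorem search_preceding_word_py_spec : Claim_equal_search_preceding_word_py := by
  intro line offset _
  unfold Spec_search_preceding_word_py search_preceding_word_py search_preceding_word_py_alt
  set l := line.toList with hl
  set n := (l.length : Int) with hn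
  by_cases he : min n offset ≤ 0
  · -- empty effective range on both sides
    rw [PySem.List.pyRange_neg_one_eq_nil (by omega)]
    simp [pvALoop, he]
  · have he' : 0 < min n offset := by omega
    have hkn : (min n offset).toNat ≤ l.length := by omega
    have hcast : ((min n offset).toNat : Int) = min n offset := Int.toNat_of_nonneg (le_of_lt he')
    have hm : min (n - 1) (offset - 1) = ((min n offset).toNat : Int) - 1 := by rw [hcast]; omega
    rw [hm, pvALoop_eq_fRev l _ hkn false, pvFRev_false]
    have hb := pvB_val (l.take (min n offset).toNat)
    simp only [if_neg he]
    by_cases h0 : pvVal ((l.take (min n offset).toNat).reverse) = 0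
    · rw [if_pos h0]
      rw [h0] at hb
      simp [Prod.ext_iff]
      omega
    · rw [if_neg h0]
      simp [Prod.ext_iff]
      omega
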